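-- pv_equiv track=rewrite | github.com/seongY0-0n/Coding-Study | 프로그래머스/1/131128. 숫자 짝꿍/숫자 짝꿍.py | solution
-- ===== SOURCE A (Python) =====
-- def solution(X, Y):
--     answer = ""
--     inter_list = list(set(X)&set(Y))
--     for s in inter_list:
--         x_num = X.count(s)
--         y_num = Y.count(s)
--         if x_num > y_num:
--             answer += s * y_num
--         else:
--             answer += s * x_num
--     answer = list(answer)
--     answer.sort(reverse = True)
--     answer = "".join(answer)
--     if answer == "":
--         answer = "-1"
--     elif len(answer) == answer.count("0"):
--         answer ="0"
--     return answer
-- ===== SOURCE B (Python) =====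
-- def solution(X, Y):
--     # Single counting pass over the ASCII code domain, high to low: emits the
--     # descending result directly -- no set intersection, no sort.
--     answer = ""
--     for code in range(127, -1, -1):
--         c = chr(code)
--         answer += c * min(X.count(c), Y.count(c))
--     if answer == "":
--         return "-1"
--     if len(answer) == answer.count("0"):
--         return "0"
--     return answer
-- ===== Notes on version B (the rewrite author's own statement) =====
-- stated objective: alternative
-- what changed: B replaces A's set-intersection, per-element count comparison and sort(reverse=True) with a single counting-sort-style pass over the ASCII code domain from 127 down to 0, appending chr(code) repeated min(X.count, Y.count) times so the descending result is produced directly with no set and no sort.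
import Mathlib
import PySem

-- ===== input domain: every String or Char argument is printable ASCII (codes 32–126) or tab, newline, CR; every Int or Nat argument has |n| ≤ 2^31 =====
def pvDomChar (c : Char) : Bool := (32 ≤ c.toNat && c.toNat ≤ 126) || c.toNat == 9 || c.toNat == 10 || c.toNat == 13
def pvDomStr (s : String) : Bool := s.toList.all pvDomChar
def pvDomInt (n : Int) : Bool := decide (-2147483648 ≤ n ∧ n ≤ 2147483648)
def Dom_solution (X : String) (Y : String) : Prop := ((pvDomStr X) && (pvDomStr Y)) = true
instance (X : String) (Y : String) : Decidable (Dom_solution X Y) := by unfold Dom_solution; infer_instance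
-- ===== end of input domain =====

-- B replaces A's set-intersection + sort(reverse=True) with one counting pass over the
-- ASCII code domain from high to low, emitting the descending answer directly (objective: alternative).

-- ===== PORT A =====
-- Ports work on the character lists; X.count(s) for a 1-char string s is the character count (exact).
-- list(set(X) & set(Y)): the fold below consumes the set's list in first-insertion order; the
-- final answer is sorted, so the result does not depend on the set's iteration order.
def pvInterA (X : List Char) (Y : List Char) : List Char :=
  PySem.Set.inter (PySem.Set.ofList X) (PySem.Set.ofList Y)

-- the for-loop: answer += s * y_num / s * x_num  (s * n on a 1-char string = List.replicate n s)
def pvAnswerA (X : List Char) (Y : List Char) : List Char :=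
  (pvInterA X Y).foldl (fun answer s =>
    let x_num := X.count s
    let y_num := Y.count s
    if x_num > y_num then answer ++ List.replicate y_num s
    else answer ++ List.replicate x_num s) []

-- answer.sort(reverse=True); "".join; answer == "" is emptiness of the list;
-- len(answer) == answer.count("0") is length = count '0' (both exact on the char list).
def solution (X : String) (Y : String) : String :=
  let answer := PySem.List.sorted (pvAnswerA X.toList Y.toList) (fun c => c) true
  if answer = [] then "-1"
  else if answer.length = answer.count '0' then "0"
  else String.ofList answer

-- ===== PORT B =====
-- for code in range(127, -1, -1): answer += chr(code) * min(X.count(c), Y.count(c))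
def pvAnswerB (X : List Char) (Y : List Char) : List Char :=
  (PySem.List.pyRange 127 (-1) (-1)).foldl (fun answer code =>
    let c := Char.ofNat code.toNat
    answer ++ List.replicate (min (X.count c) (Y.count c)) c) []

def solution_alt (X : String) (Y : String) : String :=
  let answer := pvAnswerB X.toList Y.toList
  if answer = [] then "-1"
  else if answer.length = answer.count '0' then "0"
  else String.ofList answer

-- ===== PRECONDITION & SPEC =====
def Spec_solution (X : String) (Y : String) (out : String) : Prop := out = solution_alt X Y
instance (X : String) (Y : String) (out : String) : Decidable (Spec_solution X Y out) := by unfold Spec_solution; infer_instance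

-- ===== CLAIM (what is proved, stated in full; the proofs are below) =====
def Claim_equal_solution : Prop := ∀ (X : String) (Y : String), Dom_solution X Y → Spec_solution X Y (solution X Y)

-- ===== LEMMAS AND PROOFS =====

theorem pvToNat_ofNat {n : Nat} (h : n < 128) : (Char.ofNat n).toNat = n := by
  rw [Char.toNat_ofNat, if_pos (Or.inl (by omega))]

theorem pvChar_lt_iff {a b : Char} : a < b ↔ a.toNat < b.toNat := Char.lt_def

theorem pvChar_le_iff {a b : Char} : a ≤ b ↔ a.toNat ≤ b.toNat := Char.le_def

-- the descending list of all ASCII characters, codes 127 down to 0 (proof-only)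
def pvCharsDesc : List Char := ((List.range 128).reverse).map Char.ofNat

theorem pvRange_desc :
    PySem.List.pyRange 127 (-1) (-1) = ((List.range 128).reverse).map (fun n : Nat => (n : Int)) := by
  decide

theorem pvCount_flatMap_rep (l : List Char) (f : Char → Nat) (h : l.Nodup) (c : Char) :
    (l.flatMap fun s => List.replicate (f s) s).count c = if c ∈ l then f c else 0 := by
  induction l with
  | nil => simp
  | cons a t ih =>
    rw [List.nodup_cons] at h
    obtain ⟨ha, ht⟩ := h
    rw [List.flatMap_cons, List.count_append, ih ht]
    by_cases hca : c = a
    · subst hca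
      have h0 : List.count c (List.replicate (f c) c) = f c := by simp
      rw [h0]
      simp [ha]
    · have h0 : List.count c (List.replicate (f a) a) = 0 :=
        List.count_eq_zero.mpr (fun hm => hca (List.eq_of_mem_replicate hm))
      rw [h0]
      simp [hca]

theorem pvAnswerA_eq_flatMap (X Y : List Char) :
    pvAnswerA X Y = (pvInterA X Y).flatMap
      (fun s => List.replicate (min (X.count s) (Y.count s)) s) := by
  unfold pvAnswerA
  have hfun : (fun (answer : List Char) (s : Char) =>
      let x_num := X.count s
      let y_num := Y.count s
      if x_num > y_num then answer ++ List.replicate y_num s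
      else answer ++ List.replicate x_num s)
      = fun answer s => answer ++ List.replicate (min (X.count s) (Y.count s)) s := by
    funext answer s
    by_cases hxy : X.count s > Y.count s
    · simp only [if_pos hxy]
      rw [Nat.min_eq_right (Nat.le_of_lt hxy)]
    · simp only [if_neg hxy]
      rw [Nat.min_eq_left (Nat.le_of_not_lt hxy)]
  rw [hfun, PySem.List.foldl_append_eq_flatMap, List.nil_append]

theorem pvAnswerB_eq_flatMap (X Y : List Char) :
    pvAnswerB X Y = pvCharsDesc.flatMap
      (fun c => List.replicate (min (X.count c) (Y.count c)) c) := by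
  unfold pvAnswerB pvCharsDesc
  rw [pvRange_desc, PySem.List.foldl_append_eq_flatMap, List.nil_append,
    List.flatMap_map, List.flatMap_map]
  simp

theorem pvMem_charsDesc (c : Char) : c ∈ pvCharsDesc ↔ c.toNat < 128 := by
  unfold pvCharsDesc
  constructor
  · intro hc
    obtain ⟨n, hn, rfl⟩ := List.mem_map.mp hc
    rw [List.mem_reverse, List.mem_range] at hn
    rw [pvToNat_ofNat (by omega)]
    exact hn
  · intro hc
    exact List.mem_map.mpr ⟨c.toNat, by simp [List.mem_reverse, List.mem_range, hc],
      Char.ofNat_toNat c⟩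

theorem pvNodup_charsDesc : pvCharsDesc.Nodup := by
  unfold pvCharsDesc
  refine List.Nodup.map_on ?_ (List.nodup_reverse.mpr List.nodup_range)
  intro x hx y hy hxy
  rw [List.mem_reverse, List.mem_range] at hx hy
  have h2 := congrArg Char.toNat hxy
  rwa [pvToNat_ofNat (show x < 128 by omega), pvToNat_ofNat (show y < 128 by omega)] at h2

theorem pvPairwise_charsDesc : pvCharsDesc.Pairwise (fun a b => b < a) := by
  unfold pvCharsDesc
  rw [List.pairwise_map, List.pairwise_reverse]
  refine List.Pairwise.imp_of_mem ?_ List.pairwise_lt_range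
  intro a b ha hb hab
  rw [List.mem_range] at ha hb
  refine pvChar_lt_iff.mpr ?_
  rw [pvToNat_ofNat (show a < 128 by omega), pvToNat_ofNat (show b < 128 by omega)]
  exact hab

theorem pvPairwise_flatMap_rep (l : List Char) (f : Char → Nat)
    (h : l.Pairwise (fun a b => b < a)) :
    (l.flatMap fun s => List.replicate (f s) s).Pairwise (fun a b : Char => b ≤ a) := by
  induction l with
  | nil => simp
  | cons a t ih =>
    rw [List.pairwise_cons] at h
    obtain ⟨ha, ht⟩ := h
    rw [List.flatMap_cons]
    refine List.pairwise_append.mpr ⟨?_, ih ht, ?_⟩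
    · exact List.pairwise_replicate.mpr (Or.inr le_rfl)
    · intro x hx y hy
      obtain ⟨s, hs, hys⟩ := List.mem_flatMap.mp hy
      rw [List.eq_of_mem_replicate hx, List.eq_of_mem_replicate hys]
      exact le_of_lt (ha s hs)

theorem pvCountA (X Y : List Char) (c : Char) :
    (pvAnswerA X Y).count c = min (X.count c) (Y.count c) := by
  have hnd : (pvInterA X Y).Nodup := PySem.Set.nodup_inter _ _ (PySem.Set.nodup_ofList X)
  rw [pvAnswerA_eq_flatMap, pvCount_flatMap_rep _ _ hnd c]
  by_cases hc : c ∈ pvInterA X Y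
  · rw [if_pos hc]
  · rw [if_neg hc]
    unfold pvInterA at hc
    rw [PySem.Set.mem_inter] at hc
    have h0 : X.count c = 0 ∨ Y.count c = 0 := by
      rcases not_and_or.mp (by simpa [PySem.Set.mem_ofList] using hc) with h | h
      · exact Or.inl (List.count_eq_zero.mpr h)
      · exact Or.inr (List.count_eq_zero.mpr h)
    omega

theorem pvCountB (X Y : List Char) (c : Char) :
    (pvAnswerB X Y).count c = if c.toNat < 128 then min (X.count c) (Y.count c) else 0 := by
  rw [pvAnswerB_eq_flatMap, pvCount_flatMap_rep _ _ pvNodup_charsDesc c]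
  simp only [pvMem_charsDesc c]

theorem pvAsciiLt (X : String) (h : pvDomStr X = true) (c : Char) (hc : c ∈ X.toList) :
    c.toNat < 128 := by
  unfold pvDomStr at h
  have h2 := List.all_eq_true.mp h c hc
  unfold pvDomChar at h2
  simp only [Bool.or_eq_true, Bool.and_eq_true, decide_eq_true_eq, beq_iff_eq] at h2
  omega

theorem pvMain (X Y : String) (h : Dom_solution X Y) :
    PySem.List.sorted (pvAnswerA X.toList Y.toList) (fun c => c) true = pvAnswerB X.toList Y.toList := by
  unfold Dom_solution at h
  rw [Bool.and_eq_true] at h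
  obtain ⟨hX, _⟩ := h
  have hperm : (pvAnswerA X.toList Y.toList).Perm (pvAnswerB X.toList Y.toList) := by
    rw [List.perm_iff_count]
    intro c
    rw [pvCountA, pvCountB]
    by_cases hc : c.toNat < 128
    · rw [if_pos hc]
    · rw [if_neg hc]
      have hcx : X.toList.count c = 0 :=
        List.count_eq_zero.mpr (fun hm => hc (pvAsciiLt X hX c hm))
      omega
  have h1 : (PySem.List.sorted (pvAnswerA X.toList Y.toList) (fun c => c) true).Perm
      (pvAnswerB X.toList Y.toList) :=
    (PySem.List.sorted_perm _ _ _).trans hperm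
  have hinj : Function.Injective (fun c : Char => -(c.toNat : Int)) := by
    intro a b hab
    simp only [neg_inj, Nat.cast_inj] at hab
    calc a = Char.ofNat a.toNat := (Char.ofNat_toNat a).symm
    _ = Char.ofNat b.toNat := by rw [hab]
    _ = b := Char.ofNat_toNat b
  refine PySem.List.eq_of_perm_of_pairwise_le_of_injective (fun c : Char => -(c.toNat : Int))
    hinj h1 ?_ ?_
  · refine (PySem.List.sorted_pairwise_rev _ _).imp ?_
    intro a b hba
    simp only [neg_le_neg_iff, Nat.cast_le]
    exact pvChar_le_iff.mp hba
  · rw [pvAnswerB_eq_flatMap]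
    refine (pvPairwise_flatMap_rep _ _ pvPairwise_charsDesc).imp ?_
    intro a b hba
    simp only [neg_le_neg_iff, Nat.cast_le]
    exact pvChar_le_iff.mp hba

-- ===== VERDICT (by name: the statement is the Claim_ definition above) =====
theorem solution_spec : Claim_equal_solution := by
  intro X Y h
  unfold Spec_solution solution solution_alt
  rw [pvMain X Y h]
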